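-- pv_equiv track=rewrite | github.com/himanshu-patel-dev/Competetive_Programming | Stack/max_swap_in_array.py | max_span
-- ===== SOURCE A (Python) =====
-- def max_span(lst):
-- 	"""
-- 	for each index it gives the number of consecutive elements to its
-- 	left which are less than current element before we get first element
-- 	greater than current element
-- 	"""
-- 	n = len(lst)
-- 	result = [0]*n
-- 	# for current element it holds the index prior to the
-- 	# current elemnt that are grater than current element
-- 	bigger_than = []
--
-- 	for i in range(n):
-- 		# until there is an element on stack which is
-- 		# smaller than current pop it out
-- 		while bigger_than and lst[ bigger_than[-1] ] < lst[i]: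
-- 			bigger_than.pop()
--
-- 		# if stack is not empty last element of it is greater
-- 		# than current take its index else else take -1 as index
-- 		if bigger_than:
-- 			j = bigger_than[-1]
-- 		else:
-- 			j = -1
--
-- 		# for current element store the max span possible
-- 		result[i] = i-j
-- 		bigger_than.append(i)
-- 	return result
-- ===== SOURCE B (Python) =====
-- def max_span(lst):
--     n = len(lst)
--     result = [0] * n
--     for i in range(n):
--         result[i] = 1
--         while i - result[i] >= 0 and lst[i - result[i]] < lst[i]:
--             result[i] += result[i - result[i]]
--     return result
-- ===== Notes on version B (the rewrite author's own statement) =====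
-- stated objective: alternative
-- what changed: Replaced A's monotonic stack of candidate indices by a stack-free jump-pointer DP: result[i] starts at 1 and leaps over already-measured strictly-smaller runs via result[i - result[i]] until a greater-or-equal element (or the left end) is reached.
import Mathlib
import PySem

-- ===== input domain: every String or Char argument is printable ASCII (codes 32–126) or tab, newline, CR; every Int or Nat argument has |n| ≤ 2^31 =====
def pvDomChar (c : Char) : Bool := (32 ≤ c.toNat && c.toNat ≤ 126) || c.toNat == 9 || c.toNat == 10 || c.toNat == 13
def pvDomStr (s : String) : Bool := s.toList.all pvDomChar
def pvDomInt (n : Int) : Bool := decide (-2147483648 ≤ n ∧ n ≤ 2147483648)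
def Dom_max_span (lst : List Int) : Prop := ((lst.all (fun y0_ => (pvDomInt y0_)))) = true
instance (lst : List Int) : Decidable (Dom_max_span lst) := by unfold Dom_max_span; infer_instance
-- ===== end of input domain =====

-- B replaces A's monotonic stack by a jump-pointer DP that reuses already-computed
-- spans to leap over strictly-smaller runs (objective: alternative algorithm, same cost).

-- ===== PORT A =====
-- A keeps a stack of indices (here head = Python's top, i.e. last element).
def popWhile (lst : List Int) (x : Int) : List Nat → List Nat
  | [] => []
  | j :: rest => if lst.getD j 0 < x then popWhile lst x rest else j :: rest

-- the index taken from the stack top (Python's `bigger_than[-1]`, or -1 when empty)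
def topIdx : List Nat → Int
  | [] => -1
  | t :: _ => (t : Int)

def stepA (lst : List Int) (st : List Int × List Nat) (i : Nat) : List Int × List Nat :=
  (st.1 ++ [(i : Int) - topIdx (popWhile lst (lst.getD i 0) st.2)],
   i :: popWhile lst (lst.getD i 0) st.2)

def max_span (lst : List Int) : List Int :=
  ((List.range lst.length).foldl (stepA lst) ([], [])).1

-- ===== PORT B =====
-- the while loop of B; fuel bounds the number of iterations (the position i - r
-- strictly decreases each round, so fuel = i + 1 always suffices)
def jump (lst res : List Int) (i : Nat) : Nat → Int → Int
  | 0, r => r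
  | fuel + 1, r =>
    if 0 ≤ (i : Int) - r ∧ lst.getD ((i : Int) - r).toNat 0 < lst.getD i 0 then
      jump lst res i fuel (r + res.getD ((i : Int) - r).toNat 0)
    else r

def stepB (lst : List Int) (res : List Int) (i : Nat) : List Int :=
  res ++ [jump lst res i (i + 1) 1]

def max_span_alt (lst : List Int) : List Int :=
  (List.range lst.length).foldl (stepB lst) []

-- ===== PRECONDITION & SPEC =====
def Spec_max_span (lst : List Int) (out : List Int) : Prop := out = max_span_alt lst
instance (lst : List Int) (out : List Int) : Decidable (Spec_max_span lst out) := by unfold Spec_max_span; infer_instance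

-- ===== CLAIM (what is proved, stated in full; the proofs are below) =====
def Claim_equal_max_span : Prop := ∀ (lst : List Int), Dom_max_span lst → Spec_max_span lst (max_span lst)

-- ===== LEMMAS AND PROOFS =====

-- the count of consecutive indices j, j-1, … with lst[·] < x (stopping at the
-- first index whose value is ≥ x, or at index 0)
def run (lst : List Int) (x : Int) : Nat → Nat
  | 0 => if lst.getD 0 0 < x then 1 else 0
  | j + 1 => if lst.getD (j + 1) 0 < x then run lst x j + 1 else 0

-- the intended span at index i
def spanN (lst : List Int) : Nat → Nat
  | 0 => 1
  | j + 1 => run lst (lst.getD (j + 1) 0) j + 1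

-- characterisation of the span at index i
def IsSpan (lst : List Int) (i s : Nat) : Prop :=
  1 ≤ s ∧ s ≤ i + 1 ∧
  (∀ k : Nat, (i : Int) - (s : Int) < (k : Int) → k < i → lst.getD k 0 < lst.getD i 0) ∧
  (s ≤ i → lst.getD i 0 ≤ lst.getD (i - s) 0)

theorem run_le (lst : List Int) (x : Int) (j : Nat) : run lst x j ≤ j + 1 := by
  induction j with
  | zero => simp only [run]; split <;> omega
  | succ j ih => simp only [run]; split <;> omega

theorem run_lt (lst : List Int) (x : Int) (j : Nat) :
    ∀ k : Nat, (j : Int) - (run lst x j : Int) < (k : Int) → k ≤ j → lst.getD k 0 < x := by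
  induction j with
  | zero =>
    intro k hk hk'
    simp only [run] at hk
    split at hk
    · interval_cases k; assumption
    · omega
  | succ j ih =>
    intro k hk hk'
    simp only [run] at hk
    split at hk
    · rcases Nat.lt_or_ge k (j + 1) with h | h
      · exact ih k (by push_cast at hk ⊢; omega) (by omega)
      · have : k = j + 1 := by omega
        subst this; assumption
    · omega

theorem run_stop (lst : List Int) (x : Int) (j : Nat) :
    run lst x j ≤ j → x ≤ lst.getD (j - run lst x j) 0 := by
  induction j with
  | zero =>
    intro h
    by_cases hlt : lst.getD 0 0 < x
    · simp only [run, if_pos hlt] at h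
      omega
    · simp only [run, if_neg hlt, Nat.sub_zero]
      omega
  | succ j ih =>
    intro h
    by_cases hlt : lst.getD (j + 1) 0 < x
    · simp only [run, if_pos hlt] at h ⊢
      have h' : run lst x j ≤ j := by omega
      have heq : j + 1 - (run lst x j + 1) = j - run lst x j := by omega
      rw [heq]
      exact ih h'
    · simp only [run, if_neg hlt, Nat.sub_zero]
      omega

theorem spanN_pos (lst : List Int) (i : Nat) : 1 ≤ spanN lst i := by
  cases i <;> simp [spanN]

theorem spanN_le (lst : List Int) (i : Nat) : spanN lst i ≤ i + 1 := by
  cases i with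
  | zero => simp [spanN]
  | succ j => have := run_le lst (lst.getD (j + 1) 0) j; simp only [spanN]; omega

theorem spanN_isSpan (lst : List Int) (i : Nat) : IsSpan lst i (spanN lst i) := by
  cases i with
  | zero =>
    refine ⟨by simp [spanN], by simp [spanN], ?_, ?_⟩
    · intro k hk hk'; omega
    · intro h; simp [spanN] at h
  | succ j =>
    have hle := run_le lst (lst.getD (j + 1) 0) j
    refine ⟨by simp [spanN], by simp only [spanN]; omega, ?_, ?_⟩
    · intro k hk hk'
      have hkj : k ≤ j := by omega
      exact run_lt lst (lst.getD (j + 1) 0) j k (by simp only [spanN] at hk; push_cast at hk ⊢; omega) hkj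
    · intro h
      simp only [spanN] at h ⊢
      have h' : run lst (lst.getD (j + 1) 0) j ≤ j := by omega
      have := run_stop lst (lst.getD (j + 1) 0) j h'
      have heq : j + 1 - (run lst (lst.getD (j + 1) 0) j + 1) = j - run lst (lst.getD (j + 1) 0) j := by omega
      rw [heq]; exact this

theorem span_unique (lst : List Int) (i s₁ s₂ : Nat)
    (h₁ : IsSpan lst i s₁) (h₂ : IsSpan lst i s₂) : s₁ = s₂ := by
  obtain ⟨a₁, b₁, c₁, d₁⟩ := h₁
  obtain ⟨a₂, b₂, c₂, d₂⟩ := h₂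
  by_contra hne
  rcases Nat.lt_or_ge s₁ s₂ with h | h
  · have hs₁ : s₁ ≤ i := by omega
    have hk := c₂ (i - s₁) (by omega) (by omega)
    have := d₁ hs₁
    omega
  · have hs₂ : s₂ ≤ i := by omega
    have hk := c₁ (i - s₂) (by omega) (by omega)
    have := d₂ hs₂
    omega

theorem spanN_eq (lst : List Int) (i s : Nat) (h : IsSpan lst i s) : spanN lst i = s :=
  span_unique lst i _ s (spanN_isSpan lst i) h

-- the chain of predecessors i-1 ↦ i-1-span(i-1) ↦ … ; A's stack equals chain (i-1)
def chain (lst : List Int) (c : Nat) : List Nat :=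
  c :: (if _h : spanN lst c ≤ c then chain lst (c - spanN lst c) else [])
termination_by c
decreasing_by
  have := spanN_pos lst c
  omega

-- extending a strictly-smaller run across the span of index c
theorem extend_run (lst : List Int) (i c : Nat) (hc : c < i)
    (H : ∀ k : Nat, c < k → k < i → lst.getD k 0 < lst.getD i 0)
    (hx : lst.getD c 0 < lst.getD i 0) :
    ∀ k : Nat, (c : Int) - (spanN lst c : Int) < (k : Int) → k < i → lst.getD k 0 < lst.getD i 0 := by
  intro k hk hki
  rcases Nat.lt_or_ge c k with h | h
  · exact H k h hki
  rcases Nat.eq_or_lt_of_le h with h' | h'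
  · subst h'; exact hx
  · have := (spanN_isSpan lst c).2.2.1 k hk h'
    omega

-- A's pop loop walks down the chain to the first index whose value is ≥ lst[i]
theorem popChain (lst : List Int) : ∀ c i : Nat, c < i →
    (∀ k : Nat, c < k → k < i → lst.getD k 0 < lst.getD i 0) →
    popWhile lst (lst.getD i 0) (chain lst c) =
      if spanN lst i ≤ i then chain lst (i - spanN lst i) else [] := by
  intro c
  induction c using Nat.strong_induction_on with
  | _ c ih =>
    intro i hci H
    rw [chain]
    by_cases hx : lst.getD c 0 < lst.getD i 0
    · rw [popWhile, if_pos hx]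
      by_cases hs : spanN lst c ≤ c
      · rw [dif_pos hs]
        exact ih (c - spanN lst c) (by have := spanN_pos lst c; omega) i (by omega)
          (fun k hk hki => extend_run lst i c hci H hx k (by omega) hki)
      · rw [dif_neg hs]
        have hsc : spanN lst c = c + 1 := by have := spanN_le lst c; omega
        have hspan : spanN lst i = i + 1 := by
          apply spanN_eq
          refine ⟨by omega, by omega, ?_, by omega⟩
          intro k hk hki
          exact extend_run lst i c hci H hx k (by rw [hsc]; push_cast; omega) hki
        rw [if_neg (by omega)]
        simp [popWhile]
    · rw [popWhile, if_neg hx]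
      have hspan : spanN lst i = i - c := by
        apply spanN_eq
        refine ⟨by omega, by omega, ?_, ?_⟩
        · intro k hk hki
          exact H k (by omega) hki
        · intro _
          have : i - (i - c) = c := by omega
          rw [this]; omega
      rw [if_pos (by omega), hspan]
      have heq : i - (i - c) = c := by omega
      rw [heq]
      conv_rhs => rw [chain]

-- B's while loop walks the same chain using the stored spans
theorem jumpChain (lst res : List Int) (i : Nat)
    (hres : ∀ k : Nat, k < i → res.getD k 0 = (spanN lst k : Int)) :
    ∀ fuel c : Nat, c + 1 ≤ fuel → c < i →
    (∀ k : Nat, c < k → k < i → lst.getD k 0 < lst.getD i 0) →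
    jump lst res i fuel ((i : Int) - (c : Int)) = (spanN lst i : Int) := by
  intro fuel
  induction fuel with
  | zero => intro c h; omega
  | succ fuel ih =>
    intro c hfuel hci H
    rw [jump]
    have hir : (i : Int) - ((i : Int) - (c : Int)) = (c : Int) := by ring
    rw [hir]
    have htn : ((c : Int)).toNat = c := by omega
    rw [htn]
    by_cases hx : lst.getD c 0 < lst.getD i 0
    · rw [if_pos ⟨by omega, hx⟩, hres c hci]
      by_cases hs : spanN lst c ≤ c
      · have harg : (i : Int) - (c : Int) + (spanN lst c : Int) = (i : Int) - ((c - spanN lst c : Nat) : Int) := by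
          push_cast [Nat.cast_sub hs]; ring
        rw [harg]
        exact ih (c - spanN lst c) (by have := spanN_pos lst c; omega) (by omega)
          (fun k hk hki => extend_run lst i c hci H hx k (by omega) hki)
      · have hsc : spanN lst c = c + 1 := by have := spanN_le lst c; omega
        have hspan : spanN lst i = i + 1 := by
          apply spanN_eq
          refine ⟨by omega, by omega, ?_, by omega⟩
          intro k hk hki
          exact extend_run lst i c hci H hx k (by rw [hsc]; push_cast; omega) hki
        have harg : (i : Int) - (c : Int) + (spanN lst c : Int) = (i : Int) + 1 := by
          rw [hsc]; push_cast; ring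
        rw [harg, hspan]
        cases fuel with
        | zero => rw [jump]; push_cast; ring
        | succ f =>
          rw [jump, if_neg (by push_cast; omega)]
          push_cast; ring
    · rw [if_neg (by intro h; exact hx h.2)]
      have hspan : spanN lst i = i - c := by
        apply spanN_eq
        refine ⟨by omega, by omega, ?_, ?_⟩
        · intro k hk hki
          exact H k (by omega) hki
        · intro _
          have : i - (i - c) = c := by omega
          rw [this]; omega
      rw [hspan]; push_cast [Nat.cast_sub (le_of_lt hci)]; ring

-- the accumulated fold state of port A
theorem foldA (lst : List Int) : ∀ m : Nat,
    (List.range m).foldl (stepA lst) ([], []) =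
      ((List.range m).map (fun k => (spanN lst k : Int)),
       if m = 0 then [] else chain lst (m - 1)) := by
  intro m
  induction m with
  | zero => simp
  | succ m ih =>
    rw [List.range_succ, List.foldl_append, ih, List.map_append]
    simp only [List.foldl_cons, List.foldl_nil, List.map_cons, List.map_nil,
      Nat.succ_ne_zero, if_false, Nat.add_sub_cancel]
    cases m with
    | zero =>
      rw [if_pos rfl]
      have h0 : spanN lst 0 = 1 := rfl
      rw [chain]
      norm_num [stepA, popWhile, topIdx, h0, spanN]
    | succ m =>
      rw [if_neg (Nat.succ_ne_zero m), Nat.add_sub_cancel]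
      unfold stepA
      have hpop := popChain lst m (m + 1) (by omega) (by intro k h1 h2; omega)
      rw [hpop]
      by_cases hs : spanN lst (m + 1) ≤ m + 1
      · rw [if_pos hs]
        simp only [Prod.mk.injEq]
        constructor
        · rw [chain]
          simp only [topIdx, List.append_cancel_left_eq, List.cons.injEq, and_true]
          have := spanN_pos lst (m + 1)
          omega
        · conv_rhs => rw [chain]
          rw [dif_pos hs]
      · rw [if_neg hs]
        have hsc : spanN lst (m + 1) = m + 2 := by have := spanN_le lst (m + 1); omega
        simp only [topIdx, Prod.mk.injEq]
        constructor
        · simp only [List.append_cancel_left_eq, List.cons.injEq, and_true]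
          omega
        · conv_rhs => rw [chain]
          rw [dif_neg hs]

-- the accumulated fold state of port B
theorem foldB (lst : List Int) : ∀ m : Nat,
    (List.range m).foldl (stepB lst) [] = (List.range m).map (fun k => (spanN lst k : Int)) := by
  intro m
  induction m with
  | zero => simp
  | succ m ih =>
    rw [List.range_succ, List.foldl_append, ih, List.map_append]
    simp only [List.foldl_cons, List.foldl_nil, List.map_cons, List.map_nil]
    unfold stepB
    cases m with
    | zero =>
      rw [jump, if_neg (by norm_num)]
      norm_num [spanN]
    | succ m =>
      have hres : ∀ k : Nat, k < m + 1 →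
          ((List.range (m + 1)).map (fun k => (spanN lst k : Int))).getD k 0 = (spanN lst k : Int) := by
        intro k hk
        rw [List.getD_eq_getElem?_getD, List.getElem?_map, List.getElem?_range hk]
        rfl
      have h1 : (1 : Int) = ((m + 1 : Nat) : Int) - ((m : Nat) : Int) := by push_cast; ring
      rw [h1]
      have hj := jumpChain lst _ (m + 1) hres (m + 2) m (by omega) (by omega)
        (by intro k h1 h2; omega)
      rw [hj]

theorem ports_eq (lst : List Int) : max_span lst = max_span_alt lst := by
  unfold max_span max_span_alt
  rw [foldA, foldB]

-- ===== VERDICT (by name: the statement is the Claim_ definition above) =====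
theorem max_span_spec : Claim_equal_max_span := by
  intro lst _
  unfold Spec_max_span
  exact ports_eq lst
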